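-- pv_equiv track=rewrite | github.com/qazi112/Lexical-Analyzer-Using-Python | CC_LX/modules/floatD.py | result
-- ===== SOURCE A (Python) =====
-- def start(c):
--     dfa = 0
--     if c == "f" :
--         dfa = 1
--     else:
--         # reject
--         dfa = 6
--     return dfa
--
-- def state1(c):
--     dfa = 0
--     if c == "l":
--         dfa = 2
--     else:
--         dfa = 6
--     return dfa
--
-- def state2(c):
--     dfa = 0
--     if c == "o":
--         dfa = 3
--     else:
--         dfa = 6
--     return dfa
--
-- def state3(c):
--     dfa = 0
--     if c == "a":
--         dfa = 4
--     else:
--         dfa = 6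
--     return dfa
--
-- def state4(c):
--     dfa = 0
--     if c == "t":
--         dfa = 5
--     else:
--         dfa = 6
--     return dfa
--
-- def state5(c):
--     dfa = 0
--     if len(c) != 0:
--         dfa = 6
--     return dfa
--
-- def state6(c):
--     return 6
--
-- def result(lexeme):
--     dfa = 0
--     l = len(lexeme)
--     for x in range(l):
--         if dfa == 0:
--
--             dfa = start(lexeme[x])
--         elif dfa == 1:
--
--             dfa = state1(lexeme[x])
--         elif dfa == 2:
--
--             dfa = state2(lexeme[x])
--         elif dfa == 3:
--
--             dfa = state3(lexeme[x])
--         elif dfa == 4: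
--             dfa = state4(lexeme[x])
--         elif dfa == 5:
--             dfa = state5(lexeme[x])
--         elif dfa == 6:
--             dfa = state6(lexeme[x])
--         else:
--             dfa = 0
--
--     if dfa == 5:
--         return 1
--     else:
--         return 0
-- ===== SOURCE B (Python) =====
-- def result(lexeme):
--     return 1 if lexeme == "float" else 0
-- ===== Notes on version B (the rewrite author's own statement) =====
-- stated objective: simpler
-- what changed: Replaced the 7-state DFA loop and its per-state helper functions with a single direct equality comparison of the lexeme against the keyword literal.
import Mathlib
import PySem

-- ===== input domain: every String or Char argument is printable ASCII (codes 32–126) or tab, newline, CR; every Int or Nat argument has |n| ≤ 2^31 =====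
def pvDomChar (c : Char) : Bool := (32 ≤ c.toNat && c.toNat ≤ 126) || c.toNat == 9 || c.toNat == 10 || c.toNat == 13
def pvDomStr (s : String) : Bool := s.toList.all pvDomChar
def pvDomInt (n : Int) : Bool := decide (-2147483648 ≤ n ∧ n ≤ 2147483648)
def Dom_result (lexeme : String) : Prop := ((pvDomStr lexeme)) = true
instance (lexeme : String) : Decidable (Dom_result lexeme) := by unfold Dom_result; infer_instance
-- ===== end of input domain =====

-- B replaces A's 7-state DFA loop (with its per-state helper functions) by one direct string comparison with "float" (objective: simpler).

-- ===== PORT A =====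
-- each Python state function receives the one-character string lexeme[x]
def pyStart (c : String) : Int := if c = "f" then 1 else 6
def pyState1 (c : String) : Int := if c = "l" then 2 else 6
def pyState2 (c : String) : Int := if c = "o" then 3 else 6
def pyState3 (c : String) : Int := if c = "a" then 4 else 6
def pyState4 (c : String) : Int := if c = "t" then 5 else 6
def pyState5 (c : String) : Int := if PySem.Str.len c ≠ 0 then 6 else 0
def pyState6 (_c : String) : Int := 6

-- one iteration of A's loop body: the if/elif dispatch on dfa
def stepA (dfa : Int) (c : Char) : Int :=
  let s := String.singleton c
  if dfa = 0 then pyStart s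
  else if dfa = 1 then pyState1 s
  else if dfa = 2 then pyState2 s
  else if dfa = 3 then pyState3 s
  else if dfa = 4 then pyState4 s
  else if dfa = 5 then pyState5 s
  else if dfa = 6 then pyState6 s
  else 0

-- 'for x in range(len(lexeme)): … lexeme[x] …' visits the characters in index order
def result (lexeme : String) : Int :=
  let dfa := lexeme.toList.foldl stepA 0
  if dfa = 5 then 1 else 0

-- ===== PORT B =====
def result_alt (lexeme : String) : Int := if lexeme = "float" then 1 else 0

-- ===== PRECONDITION & SPEC =====
def Spec_result (lexeme : String) (out : Int) : Prop := out = result_alt lexeme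
instance (lexeme : String) (out : Int) : Decidable (Spec_result lexeme out) := by unfold Spec_result; infer_instance

-- ===== CLAIM (what is proved, stated in full; the proofs are below) =====
def Claim_equal_result : Prop := ∀ (lexeme : String), Dom_result lexeme → Spec_result lexeme (result lexeme)

-- ===== LEMMAS AND PROOFS =====
theorem stepA_zero (c : Char) : stepA 0 c = if c = 'f' then 1 else 6 := by
  simp [stepA, pyStart, String.singleton, String.ext_iff]
theorem stepA_one (c : Char) : stepA 1 c = if c = 'l' then 2 else 6 := by
  simp [stepA, pyState1, String.singleton, String.ext_iff]
theorem stepA_two (c : Char) : stepA 2 c = if c = 'o' then 3 else 6 := by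
  simp [stepA, pyState2, String.singleton, String.ext_iff]
theorem stepA_three (c : Char) : stepA 3 c = if c = 'a' then 4 else 6 := by
  simp [stepA, pyState3, String.singleton, String.ext_iff]
theorem stepA_four (c : Char) : stepA 4 c = if c = 't' then 5 else 6 := by
  simp [stepA, pyState4, String.singleton, String.ext_iff]
-- from state 5 any further character rejects (the indexed character is never empty)
theorem stepA_five (c : Char) : stepA 5 c = 6 := by
  simp [stepA, pyState5, PySem.Str.len]
theorem stepA_six (c : Char) : stepA 6 c = 6 := by
  simp [stepA, pyState6]
-- state 6 is absorbing
theorem foldA_six (l : List Char) : List.foldl stepA 6 l = 6 := by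
  induction l with
  | nil => rfl
  | cons c l ih => simpa [stepA_six] using ih

-- the DFA accepts exactly the character list of "float"
theorem foldA_zero (l : List Char) :
    List.foldl stepA 0 l = 5 ↔ l = ['f', 'l', 'o', 'a', 't'] := by
  constructor
  · intro h
    match l with
    | [] | [a] | [a,b] | [a,b,c] | [a,b,c,d] | [a,b,c,d,e] | a :: b :: c :: d :: e :: f :: rest =>
      simp only [List.foldl] at h
      repeat' first
        | simp only [stepA_zero, stepA_one, stepA_two, stepA_three, stepA_four,
            stepA_five, stepA_six, foldA_six] at h
        | split_ifs at h
      all_goals simp_all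
  · intro h; subst h; decide

theorem string_eq_float (lexeme : String) :
    lexeme = "float" ↔ lexeme.toList = ['f', 'l', 'o', 'a', 't'] := by
  constructor
  · intro h; subst h; rfl
  · intro h
    have h2 : lexeme.toList = "float".toList := by simpa using h
    exact String.toList_injective h2

-- ===== VERDICT (by name: the statement is the Claim_ definition above) =====
theorem result_spec : Claim_equal_result := by
  intro lexeme _
  unfold Spec_result result result_alt
  by_cases h : lexeme = "float"
  · rw [if_pos ((foldA_zero _).mpr ((string_eq_float _).mp h)), if_pos h]
  · rw [if_neg (fun hc => h ((string_eq_float _).mpr ((foldA_zero _).mp hc))), if_neg h]
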